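-- pv_equiv track=rewrite | github.com/tsackton/taelgar | _scripts/build_session_note_components.py | parse_subsection
-- ===== SOURCE A (Python) =====
-- from typing import Any, Dict, Iterable, List, Optional, Sequence, Tuple
--
-- def parse_subsection(lines: Sequence[str], heading: str) -> Optional[str]:
--     start_index: Optional[int] = None
--     for index, line in enumerate(lines):
--         if line.strip() == heading:
--             start_index = index + 1
--             break
--     if start_index is None:
--         return None
--     end_index = len(lines)
--     for index in range(start_index, len(lines)):
--         if lines[index].startswith("#### ") or lines[index].startswith("### "):
--             end_index = index
--             break
--     return "\n".join(lines[start_index:end_index]).strip()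
-- ===== SOURCE B (Python) =====
-- def parse_subsection(lines, heading):
--     found = False
--     collected = []
--     for line in lines:
--         if not found:
--             if line.strip() == heading:
--                 found = True
--         else:
--             if line.startswith(("#### ", "### ")):
--                 break
--             collected.append(line)
--     if not found:
--         return None
--     return "\n".join(collected).strip()
-- ===== Notes on version B (the rewrite author's own statement) =====
-- stated objective: alternative
-- what changed: Replaced A's two index-based scans (find heading index, then range-scan for the next heading and slice) by one single pass over the lines with a 'found' flag and a list accumulator, using no indices or slicing.
import Mathlib
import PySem

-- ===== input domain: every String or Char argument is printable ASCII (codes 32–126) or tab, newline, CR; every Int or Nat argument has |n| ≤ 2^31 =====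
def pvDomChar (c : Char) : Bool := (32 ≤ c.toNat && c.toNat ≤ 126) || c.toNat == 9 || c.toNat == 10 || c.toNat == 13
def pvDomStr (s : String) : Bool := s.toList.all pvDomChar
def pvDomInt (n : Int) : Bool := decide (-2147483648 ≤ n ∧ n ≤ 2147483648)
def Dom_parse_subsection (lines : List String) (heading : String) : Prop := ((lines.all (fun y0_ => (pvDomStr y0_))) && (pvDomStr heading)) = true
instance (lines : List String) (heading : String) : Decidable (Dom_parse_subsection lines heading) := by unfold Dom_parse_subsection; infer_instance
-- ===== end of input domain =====

-- B replaces A's two index-based scans plus slicing by a single structural pass with a found-flag and an accumulator (alternative decomposition, same cost); return values proved equal on all inputs.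


-- ===== PORT A =====
-- first loop: for index, line in enumerate(lines): if line.strip() == heading: start_index = index+1; break
def pvA_findStart (heading : String) (i : Int) : List String → Option Int
  | [] => none
  | line :: rest =>
      if PySem.Str.strip line == heading then some (i + 1)
      else pvA_findStart heading (i + 1) rest

-- second loop: for index in range(start_index, len(lines)): if lines[index].startswith(...): end_index = index; break
-- (lines[index] is always in range here; pyGetD is the in-range indexing idiom)
def pvA_findEnd (lines : List String) : List Int → Option Int
  | [] => none
  | i :: is =>
      if PySem.Str.startswith (PySem.List.pyGetD lines i "") "#### "
          || PySem.Str.startswith (PySem.List.pyGetD lines i "") "### " then some i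
      else pvA_findEnd lines is

def parse_subsection (lines : List String) (heading : String) : Option String :=
  match pvA_findStart heading 0 lines with
  | none => none
  | some start_index =>
      let end_index :=
        (pvA_findEnd lines (PySem.List.pyRange start_index (lines.length : Int) 1)).getD
          (lines.length : Int)
      some (PySem.Str.strip
        (PySem.Str.join "\n" (PySem.List.slice lines (some start_index) (some end_index))))

-- ===== PORT B =====
-- single pass with a 'found' flag and an accumulator; break encoded by returning the state
def pvB_loop (heading : String) (found : Bool) (collected : List String) :
    List String → Bool × List String
  | [] => (found, collected)
  | line :: rest =>
      if !found then
        if PySem.Str.strip line == heading then pvB_loop heading true collected rest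
        else pvB_loop heading found collected rest
      else
        if PySem.Str.startswith line "#### " || PySem.Str.startswith line "### " then
          (found, collected)
        else pvB_loop heading found (collected ++ [line]) rest

def parse_subsection_alt (lines : List String) (heading : String) : Option String :=
  match pvB_loop heading false [] lines with
  | (false, _) => none
  | (true, collected) => some (PySem.Str.strip (PySem.Str.join "\n" collected))

-- ===== PRECONDITION & SPEC =====
def Spec_parse_subsection (lines : List String) (heading : String) (out : Option String) : Prop := out = parse_subsection_alt lines heading
instance (lines : List String) (heading : String) (out : Option String) : Decidable (Spec_parse_subsection lines heading out) := by unfold Spec_parse_subsection; infer_instance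

-- ===== CLAIM (what is proved, stated in full; the proofs are below) =====
def Claim_equal_parse_subsection : Prop := ∀ (lines : List String) (heading : String), Dom_parse_subsection lines heading → Spec_parse_subsection lines heading (parse_subsection lines heading)

-- ===== LEMMAS AND PROOFS =====

-- the stop predicate of the second phase
def pvStop (l : String) : Bool :=
  PySem.Str.startswith l "#### " || PySem.Str.startswith l "### "

lemma findStart_eq (heading : String) (lines : List String) : ∀ (i : Int),
    pvA_findStart heading i lines
      = (lines.findIdx? (fun l => PySem.Str.strip l == heading)).map
          (fun k => i + (k : Int) + 1) := by
  induction lines with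
  | nil => intro i; simp [pvA_findStart]
  | cons l rest ih =>
      intro i
      by_cases h : PySem.Str.strip l == heading
      · simp [pvA_findStart, h, List.findIdx?_cons]
      · rw [List.findIdx?_cons]
        simp only [pvA_findStart, h, Bool.false_eq_true, if_false, cond_false, ih (i + 1)]
        cases hf : rest.findIdx? (fun l => PySem.Str.strip l == heading) with
        | none => simp [hf]
        | some k => simp [hf]; push_cast; ring

lemma findEnd_mem {lines : List String} {is : List Int} {i : Int}
    (h : pvA_findEnd lines is = some i) : i ∈ is := by
  induction is with
  | nil => simp [pvA_findEnd] at h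
  | cons j js ih =>
      by_cases hj : (PySem.Str.startswith (PySem.List.pyGetD lines j "") "#### "
          || PySem.Str.startswith (PySem.List.pyGetD lines j "") "### ") = true
      · rw [pvA_findEnd, if_pos hj] at h
        simp only [Option.some.injEq] at h
        exact h ▸ List.mem_cons_self
      · rw [pvA_findEnd, if_neg hj] at h
        exact List.mem_cons_of_mem _ (ih h)

lemma sliceEnd_eq (d : Nat) : ∀ (s : Nat) (lines : List String), lines.length = s + d →
    PySem.List.slice lines (some (s : Int))
        (some ((pvA_findEnd lines (PySem.List.pyRange (s : Int) (lines.length : Int) 1)).getD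
          (lines.length : Int)))
      = (lines.drop s).takeWhile (fun l => !pvStop l) := by
  induction d with
  | zero =>
      intro s lines hlen
      have h0 : PySem.List.pyRange (s : Int) (lines.length : Int) 1 = [] :=
        PySem.List.pyRange_one_eq_nil (by omega)
      rw [h0]
      simp only [pvA_findEnd, Option.getD_none]
      rw [PySem.List.slice_natCast]
      simp [List.drop_eq_nil_of_le (by omega : lines.length ≤ s)]
  | succ d ih =>
      intro s lines hlen
      have hs : s < lines.length := by omega
      have hcons : PySem.List.pyRange (s : Int) (lines.length : Int) 1
          = (s : Int) :: PySem.List.pyRange ((s : Int) + 1) (lines.length : Int) 1 :=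
        PySem.List.pyRange_one_cons (by exact_mod_cast hs)
      have hget : PySem.List.pyGetD lines (s : Int) "" = lines[s] := by
        simp [PySem.List.pyGetD, hs]
      have hdrop : lines.drop s = lines[s] :: lines.drop (s + 1) :=
        List.drop_eq_getElem_cons hs
      rw [hcons]
      by_cases hb : pvStop lines[s] = true
      · have hb' : (PySem.Str.startswith (PySem.List.pyGetD lines (s:Int) "") "#### "
            || PySem.Str.startswith (PySem.List.pyGetD lines (s:Int) "") "### ") = true := by
          rw [hget]; exact hb
        rw [pvA_findEnd, if_pos hb', Option.getD_some, PySem.List.slice_natCast]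
        rw [Nat.sub_self, List.take_zero, hdrop, List.takeWhile_cons,
          if_neg (by rw [hb]; simp)]
      · have hb' : (PySem.Str.startswith (PySem.List.pyGetD lines (s:Int) "") "#### "
            || PySem.Str.startswith (PySem.List.pyGetD lines (s:Int) "") "### ") = false := by
          rw [hget]; simpa [pvStop] using hb
        rw [pvA_findEnd, if_neg (by rw [hb']; simp)]
        have hcast : ((s : Int) + 1) = (((s + 1 : Nat)) : Int) := by push_cast; ring
        rw [hcast]
        set eo := pvA_findEnd lines (PySem.List.pyRange ((s + 1 : Nat) : Int) (lines.length : Int) 1) with heo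
        have hE : ∃ E : Nat, eo.getD (lines.length : Int) = (E : Int) ∧ s + 1 ≤ E ∧ E ≤ lines.length := by
          cases heq : eo with
          | none => exact ⟨lines.length, by simp [heq], by omega, le_rfl⟩
          | some i =>
            have hm := findEnd_mem (heo ▸ heq)
            rw [PySem.List.mem_pyRange_one] at hm
            refine ⟨i.toNat, by simp [heq]; omega, by omega, by omega⟩
        obtain ⟨E, hEeq, hE1, hE2⟩ := hE
        have hIH := ih (s + 1) lines (by omega)
        rw [hEeq] at hIH ⊢
        rw [PySem.List.slice_natCast] at hIH ⊢
        rw [hdrop, List.takeWhile_cons]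
        simp only [hb, Bool.not_false, if_true]
        have hEs : E - s = (E - (s + 1)) + 1 := by omega
        rw [hEs, List.take_succ_cons, hIH]

lemma bloop_collect (heading : String) (rest : List String) : ∀ (acc : List String),
    pvB_loop heading true acc rest = (true, acc ++ rest.takeWhile (fun l => !pvStop l)) := by
  induction rest with
  | nil => intro acc; simp [pvB_loop]
  | cons l t ih =>
      intro acc
      by_cases h : pvStop l = true
      · have h' : (PySem.Str.startswith l "#### " || PySem.Str.startswith l "### ") = true := h
        rw [pvB_loop]
        simp only [Bool.not_true, Bool.false_eq_true, if_false]
        rw [if_pos h']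
        simp [List.takeWhile_cons, h]
      · have h' : (PySem.Str.startswith l "#### " || PySem.Str.startswith l "### ") = false := by
          simpa [pvStop] using h
        rw [pvB_loop]
        simp only [Bool.not_true, Bool.false_eq_true, if_false]
        rw [if_neg (by rw [h']; simp)]
        simp [List.takeWhile_cons, h, ih]

lemma bloop_eq (heading : String) (lines : List String) :
    pvB_loop heading false [] lines
      = match lines.findIdx? (fun l => PySem.Str.strip l == heading) with
        | none => (false, [])
        | some k => (true, (lines.drop (k + 1)).takeWhile (fun l => !pvStop l)) := by
  induction lines with
  | nil => simp [pvB_loop]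
  | cons l t ih =>
      rw [List.findIdx?_cons]
      by_cases h : PySem.Str.strip l == heading
      · simp [pvB_loop, h, bloop_collect]
      · simp only [h, Bool.false_eq_true, cond_false]
        rw [pvB_loop]
        simp only [Bool.not_false, if_true, h, Bool.false_eq_true, if_false, ih]
        cases hf : t.findIdx? (fun l => PySem.Str.strip l == heading) with
        | none => simp [hf]
        | some k => simp [hf]

-- ===== VERDICT (by name: the statement is the Claim_ definition above) =====
theorem parse_subsection_spec : Claim_equal_parse_subsection := by
  intro lines heading _
  unfold Spec_parse_subsection parse_subsection parse_subsection_alt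
  rw [findStart_eq, bloop_eq]
  cases hf : lines.findIdx? (fun l => PySem.Str.strip l == heading) with
  | none => simp
  | some k =>
      have hk : k < lines.length := by
        rw [List.findIdx?_eq_some_iff_findIdx_eq] at hf; exact hf.1
      have hcast : (0 : Int) + (k : Int) + 1 = (((k + 1 : Nat)) : Int) := by push_cast; ring
      simp only [Option.pure_def, Option.bind_eq_bind, Option.bind_some, Option.map_some, hcast,
        sliceEnd_eq (lines.length - (k + 1)) (k + 1) lines (by omega)]
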